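-- pv_equiv track=rewrite | github.com/1337samuels/DevinDemo | web/app.py | _mask_cmd
-- ===== SOURCE A (Python) =====
-- _SECRET_FLAGS = {
--     "--api-key",
--     "--v1-api-key",
--     "--notion-api-key",
--     "--slack-webhook-url",
-- }
--
-- def _mask_cmd(cmd: list[str]) -> str:
--     """Return a display-safe version of *cmd* with secret values masked."""
--     parts: list[str] = []
--     mask_next = False
--     for token in cmd:
--         if mask_next:
--             parts.append("****")
--             mask_next = False
--         elif token in _SECRET_FLAGS:
--             parts.append(token)
--             mask_next = True
--         else:
--             parts.append(token)
--     return " ".join(parts)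
-- ===== SOURCE B (Python) =====
-- _SECRET_FLAGS = {
--     "--api-key",
--     "--v1-api-key",
--     "--notion-api-key",
--     "--slack-webhook-url",
-- }
--
-- def _mask_cmd(cmd: list[str]) -> str:
--     """Return a display-safe version of *cmd* with secret values masked.
--
--     Search-and-split: repeatedly locate the earliest secret flag, copy the
--     untouched prefix through the flag wholesale, emit '****' for its value
--     position (if any), and continue after the masked value.
--     """
--     out: list[str] = []
--     rest = cmd
--     while True:
--         idxs = [rest.index(f) for f in _SECRET_FLAGS if f in rest]
--         if not idxs:
--             out.extend(rest)
--             break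
--         j = min(idxs)
--         out.extend(rest[:j + 1])
--         if j + 1 < len(rest):
--             out.append("****")
--         rest = rest[j + 2:]
--     return " ".join(out)
-- ===== Notes on version B (the rewrite author's own statement) =====
-- stated objective: alternative
-- what changed: Replaces A's per-token boolean-state scan with a search-and-split loop: find the earliest occurrence of any secret flag (via list.index/min), copy the clean prefix plus the flag wholesale, emit '****' for the value slot if one exists, and recurse on the tail after the value.
import Mathlib
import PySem

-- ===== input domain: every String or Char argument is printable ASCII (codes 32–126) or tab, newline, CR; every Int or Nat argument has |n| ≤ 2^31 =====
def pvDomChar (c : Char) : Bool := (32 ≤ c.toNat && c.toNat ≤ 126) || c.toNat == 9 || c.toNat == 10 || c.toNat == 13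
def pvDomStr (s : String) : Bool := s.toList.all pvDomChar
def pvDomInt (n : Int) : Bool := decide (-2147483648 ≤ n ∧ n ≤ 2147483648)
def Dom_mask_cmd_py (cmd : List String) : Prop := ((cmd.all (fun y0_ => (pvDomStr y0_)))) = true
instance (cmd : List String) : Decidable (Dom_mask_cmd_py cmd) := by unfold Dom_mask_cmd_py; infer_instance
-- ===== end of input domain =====

-- B replaces A's per-token mask_next state scan with a search-and-split loop (find the
-- earliest secret flag via index/min, copy the clean prefix wholesale, mask the value slot,
-- recurse after it); objective: alternative algorithm, same asymptotic cost.


-- ===== PORT A =====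
def pvFlagsList : List String := ["--api-key", "--v1-api-key", "--notion-api-key", "--slack-webhook-url"]

def pvSecretFlags : PySem.Set String := PySem.Set.ofList pvFlagsList

-- literal port of A's loop body: state = (parts, mask_next)
def maskStepA (st : List String × Bool) (token : String) : List String × Bool :=
  if st.2 then (st.1 ++ ["****"], false)
  else if PySem.Set.contains pvSecretFlags token then (st.1 ++ [token], true)
  else (st.1 ++ [token], false)

def mask_cmd_py (cmd : List String) : String :=
  let st := cmd.foldl maskStepA ([], false)
  PySem.Str.join " " st.1

-- ===== PORT B =====
-- termination fact the port's recursion cites: the tail after the found flag's value is shorter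
theorem maskSplit_dec (rest : List String) (j : Nat)
    (h : PySem.List.min? (pvFlagsList.filterMap (fun f => PySem.List.index? rest f)) (fun x => x) = some j) :
    (PySem.List.slice rest (some ((j : Int) + 2)) none).length < rest.length := by
  have hj : j ∈ pvFlagsList.filterMap (fun f => PySem.List.index? rest f) := PySem.List.min?_mem h
  obtain ⟨f, -, hf⟩ := List.mem_filterMap.mp hj
  obtain ⟨hlt, -, -⟩ := PySem.List.getElem_of_index?_eq_some hf
  rw [PySem.List.slice_from rest (show (0:Int) ≤ (j : Int) + 2 by omega)]
  simp only [List.length_drop]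
  omega

-- port of B's while loop: find earliest secret flag (index/min), copy through it, mask, recurse
def maskSplit (rest : List String) : List String :=
  -- idxs = [rest.index(f) for f in _SECRET_FLAGS if f in rest]; 'not idxs' / 'min(idxs)' is the match on min?
  match h : PySem.List.min? (pvFlagsList.filterMap (fun f => PySem.List.index? rest f)) (fun x => x) with
  | none => rest
  | some j =>
      PySem.List.slice rest none (some ((j : Int) + 1)) ++
      (if (j : Int) + 1 < (rest.length : Int) then ["****"] else []) ++
      maskSplit (PySem.List.slice rest (some ((j : Int) + 2)) none)
  termination_by rest.length
  decreasing_by exact maskSplit_dec rest j h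

def mask_cmd_py_alt (cmd : List String) : String :=
  PySem.Str.join " " (maskSplit cmd)

-- ===== PRECONDITION & SPEC =====
def Spec_mask_cmd_py (cmd : List String) (out : String) : Prop := out = mask_cmd_py_alt cmd
instance (cmd : List String) (out : String) : Decidable (Spec_mask_cmd_py cmd out) := by unfold Spec_mask_cmd_py; infer_instance

-- ===== CLAIM (what is proved, stated in full; the proofs are below) =====
def Claim_equal_mask_cmd_py : Prop := ∀ (cmd : List String), Dom_mask_cmd_py cmd → Spec_mask_cmd_py cmd (mask_cmd_py cmd)

-- ===== LEMMAS AND PROOFS =====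

-- common reference point for both ports: mask the token after each secret flag, pairwise
def maskPairs : List String → List String
  | [] => []
  | t :: rest =>
    if PySem.Set.contains pvSecretFlags t then
      match rest with
      | [] => [t]
      | _ :: rest' => t :: "****" :: maskPairs rest'
    else t :: maskPairs rest

theorem maskLoopA_eq (cmd : List String) : ∀ parts : List String,
    (List.foldl maskStepA (parts, false) cmd).1 = parts ++ maskPairs cmd := by
  induction cmd using maskPairs.induct with
  | case1 => intro parts; simp [maskPairs]
  | case2 t hsec =>
      intro parts
      have hm : t ∈ pvSecretFlags := by simpa using hsec
      simp [maskPairs, List.foldl, maskStepA, hm]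
  | case3 t hsec u rest' ih =>
      intro parts
      have hm : t ∈ pvSecretFlags := by simpa using hsec
      have h1 : maskStepA (parts, false) t = (parts ++ [t], true) := by
        simp [maskStepA, hm]
      have h2 : maskStepA (parts ++ [t], true) u = (parts ++ [t] ++ ["****"], false) := by
        simp [maskStepA]
      simp only [List.foldl, h1, h2, ih, maskPairs, hsec, if_pos]
      simp
  | case4 t rest hsec ih =>
      intro parts
      have hm : t ∉ pvSecretFlags := by simpa using hsec
      have h1 : maskStepA (parts, false) t = (parts ++ [t], false) := by
        simp [maskStepA, hm]
      simp only [List.foldl, h1, ih]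
      conv_rhs => rw [maskPairs.eq_def]
      simp
      intro h; exact absurd h hm

-- a prefix with no secret token passes through maskPairs unchanged
theorem maskPairs_append_clean (pre : List String)
    (hc : ∀ x ∈ pre, ¬ PySem.Set.contains pvSecretFlags x = true) :
    ∀ l : List String, maskPairs (pre ++ l) = pre ++ maskPairs l := by
  induction pre with
  | nil => intro l; simp
  | cons x pre ih =>
      intro l
      have hx : x ∉ pvSecretFlags := by simpa using hc x (by simp)
      have ih' := ih (fun y hy => hc y (by simp [hy])) l
      rw [maskPairs.eq_def]
      simp [hx, ih']

theorem maskPairs_clean (l : List String)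
    (hc : ∀ x ∈ l, ¬ PySem.Set.contains pvSecretFlags x = true) :
    maskPairs l = l := by
  have := maskPairs_append_clean l hc []
  simpa [maskPairs] using this

-- membership in the flag set vs the literal flag list
theorem contains_iff_mem_flags (t : String) :
    PySem.Set.contains pvSecretFlags t = true ↔ t ∈ pvFlagsList := by
  rw [PySem.Set.contains_iff pvSecretFlags t]
  simpa [pvSecretFlags] using PySem.Set.mem_ofList pvFlagsList t

-- characterisation of B's min-of-indices search
theorem min_idxs_none (rest : List String)
    (h : PySem.List.min? (pvFlagsList.filterMap (fun f => PySem.List.index? rest f)) (fun x => x) = none) :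
    ∀ x ∈ rest, ¬ PySem.Set.contains pvSecretFlags x = true := by
  intro x hx hsec
  have hmem : x ∈ pvFlagsList := (contains_iff_mem_flags x).mp hsec
  have hidx : (PySem.List.index? rest x).isSome := (PySem.List.index?_isSome_iff rest x).mpr hx
  obtain ⟨k, hk⟩ := Option.isSome_iff_exists.mp hidx
  have : k ∈ pvFlagsList.filterMap (fun f => PySem.List.index? rest f) :=
    List.mem_filterMap.mpr ⟨x, hmem, hk⟩
  rw [(PySem.List.min?_eq_none_iff _ _).mp h] at this
  simp at this

theorem min_idxs_some (rest : List String) (j : Nat)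
    (h : PySem.List.min? (pvFlagsList.filterMap (fun f => PySem.List.index? rest f)) (fun x => x) = some j) :
    ∃ hj : j < rest.length,
      PySem.Set.contains pvSecretFlags rest[j] = true ∧
      ∀ k (hk : k < rest.length), k < j → ¬ PySem.Set.contains pvSecretFlags rest[k] = true := by
  have hj : j ∈ pvFlagsList.filterMap (fun f => PySem.List.index? rest f) := PySem.List.min?_mem h
  obtain ⟨f, hfmem, hf⟩ := List.mem_filterMap.mp hj
  obtain ⟨hlt, hget, -⟩ := PySem.List.getElem_of_index?_eq_some hf
  refine ⟨hlt, by rw [hget]; exact (contains_iff_mem_flags f).mpr hfmem, ?_⟩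
  intro k hk hkj hsec
  have hgmem : rest[k] ∈ pvFlagsList := (contains_iff_mem_flags _).mp hsec
  have hgin : rest[k] ∈ rest := List.getElem_mem hk
  obtain ⟨k', hk'⟩ := Option.isSome_iff_exists.mp ((PySem.List.index?_isSome_iff rest rest[k]).mpr hgin)
  have hk'mem : k' ∈ pvFlagsList.filterMap (fun f => PySem.List.index? rest f) :=
    List.mem_filterMap.mpr ⟨rest[k], hgmem, hk'⟩
  have hle : j ≤ k' := PySem.List.min?_isMin h k' hk'mem
  obtain ⟨hk'len, hk'get, hfirst⟩ := PySem.List.getElem_of_index?_eq_some hk'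
  exact hfirst k (by omega) rfl

-- B's search-and-split computes the same masked token list
theorem maskSplit_eq (rest : List String) : maskSplit rest = maskPairs rest := by
  induction rest using maskSplit.induct with
  | case1 rest h =>
      rw [maskSplit.eq_def]
      split
      · exact (maskPairs_clean rest (min_idxs_none rest h)).symm
      · rename_i j heq; rw [h] at heq; cases heq
  | case2 rest j h ih =>
      obtain ⟨hj, hsec, hclean⟩ := min_idxs_some rest j h
      rw [maskSplit.eq_def]
      split
      · rename_i heq; rw [h] at heq; cases heq
      rename_i j' heq
      rw [h] at heq
      injection heq with hjj
      subst hjj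
      rw [PySem.List.slice_to rest (show (0:Int) ≤ (j : Int) + 1 by omega)] at *
      rw [PySem.List.slice_from rest (show (0:Int) ≤ (j : Int) + 2 by omega)] at ih ⊢
      have ht1 : ((j : Int) + 1).toNat = j + 1 := by omega
      have ht2 : ((j : Int) + 2).toNat = j + 2 := by omega
      rw [ht1]
      rw [ht2] at ih ⊢
      -- decompose rest at position j
      have htake : rest.take (j + 1) = rest.take j ++ [rest[j]] := by
        rw [List.take_succ]
        simp [List.getElem?_eq_getElem hj]
      have hcleanpre : ∀ x ∈ rest.take j, ¬ PySem.Set.contains pvSecretFlags x = true := by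
        intro x hx
        obtain ⟨k, hk, hxeq⟩ := List.mem_iff_getElem.mp hx
        have hkj : k < j := by simp [List.length_take] at hk; omega
        have hkl : k < rest.length := by omega
        have : (rest.take j)[k] = rest[k] := List.getElem_take ..
        rw [← hxeq, this]
        exact hclean k hkl hkj
      have hsplit : rest = rest.take j ++ rest[j] :: rest.drop (j + 1) := by
        conv_lhs => rw [← List.take_append_drop j rest]
        rw [List.getElem_cons_drop hj]
      by_cases hlen : j + 1 < rest.length
      · have hcond : ((j : Int) + 1 < (rest.length : Int)) := by omega
        have hdrop : rest.drop (j + 1) = rest[j + 1] :: rest.drop (j + 2) :=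
          (List.getElem_cons_drop hlen).symm
        have hexp : maskPairs (rest[j] :: rest[j + 1] :: rest.drop (j + 2)) =
            rest[j] :: "****" :: maskPairs (rest.drop (j + 2)) := by
          rw [maskPairs.eq_def]
          simp only [hsec, if_true]
        rw [if_pos hcond, ih, htake]
        conv_rhs => rw [hsplit]
        rw [maskPairs_append_clean _ hcleanpre, hdrop, hexp]
        simp only [List.append_assoc, List.cons_append, List.nil_append]
      · have hcond : ¬ ((j : Int) + 1 < (rest.length : Int)) := by omega
        have hdropnil : rest.drop (j + 1) = [] := List.drop_eq_nil_of_le (by omega)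
        have hdrop2nil : rest.drop (j + 2) = [] := List.drop_eq_nil_of_le (by omega)
        have hexp : maskPairs [rest[j]] = [rest[j]] := by
          rw [maskPairs.eq_def]
          simp only [hsec, if_true]
        rw [if_neg hcond, ih, hdrop2nil, htake]
        conv_rhs => rw [hsplit]
        rw [maskPairs_append_clean _ hcleanpre, hdropnil, hexp]
        simp [maskPairs]

-- ===== VERDICT (by name: the statement is the Claim_ definition above) =====
theorem mask_cmd_py_spec : Claim_equal_mask_cmd_py := by
  intro cmd _
  unfold Spec_mask_cmd_py mask_cmd_py mask_cmd_py_alt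
  dsimp only
  rw [maskLoopA_eq cmd [], maskSplit_eq]
  simp
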